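-- pv_equiv track=rewrite | github.com/goluckyryan/HELIOSMagControl | txt_to_png.py | _parse_spans
-- ===== SOURCE A (Python) =====
-- def _parse_spans(line: str):
--     """
--     Parse a line that may contain [...] reverse-video markers.
--     Returns list of (text, reverse) tuples.
--     Nested brackets not supported; unmatched [ treated as literal.
--     """
--     spans = []
--     i = 0
--     while i < len(line):
--         bracket = line.find("[", i)
--         if bracket == -1:
--             spans.append((line[i:], False))
--             break
--         if bracket > i:
--             spans.append((line[i:bracket], False))
--         close = line.find("]", bracket + 1)
--         if close == -1:
--             # no closing bracket — treat rest as normal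
--             spans.append((line[bracket:], False))
--             break
--         inner = line[bracket + 1:close]
--         spans.append((inner, True))
--         i = close + 1
--     return spans if spans else [("", False)]
-- ===== SOURCE B (Python) =====
-- def _parse_spans(line: str):
--     """Single-pass character state machine: accumulate a buffer, toggling
--     in/out of bracket mode, instead of find()-based index jumps."""
--     spans = []
--     buf = []
--     inb = False
--     for ch in line:
--         if inb:
--             if ch == "]":
--                 spans.append(("".join(buf), True))
--                 buf = []
--                 inb = False
--             else:
--                 buf.append(ch)
--         else:
--             if ch == "[":
--                 if buf:
--                     spans.append(("".join(buf), False))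
--                 buf = []
--                 inb = True
--             else:
--                 buf.append(ch)
--     if inb:
--         spans.append(("[" + "".join(buf), False))
--     elif buf:
--         spans.append(("".join(buf), False))
--     return spans if spans else [("", False)]
-- ===== Notes on version B (the rewrite author's own statement) =====
-- stated objective: alternative
-- what changed: Replaces A's find()-based index-jumping while-loop (locate '[' then ']' and slice) with a single character-by-character state machine carrying a bracket-mode flag and a buffer.
import Mathlib
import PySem

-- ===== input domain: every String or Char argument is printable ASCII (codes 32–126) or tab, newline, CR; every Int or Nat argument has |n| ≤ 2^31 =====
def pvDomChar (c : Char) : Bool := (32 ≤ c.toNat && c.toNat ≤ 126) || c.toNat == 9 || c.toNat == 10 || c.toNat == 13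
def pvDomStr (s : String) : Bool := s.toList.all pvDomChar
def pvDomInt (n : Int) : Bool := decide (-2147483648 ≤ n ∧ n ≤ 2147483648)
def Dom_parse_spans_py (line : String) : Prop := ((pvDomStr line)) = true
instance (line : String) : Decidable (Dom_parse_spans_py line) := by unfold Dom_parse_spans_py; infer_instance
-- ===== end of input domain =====

-- B replaces A's find()-based index-jumping loop with a single character-by-character
-- state machine (bracket-mode flag + buffer); objective: alternative, same linear cost.

-- ===== PORT A =====
-- A's while-loop advances an index i and only ever inspects line[i:]; the port carries
-- that suffix directly: line.find("[", i) becomes Chars.find on the suffix (exact by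
-- PySem.Chars.findFrom_natCast: find from i equals find on the dropped suffix, offset by i),
-- and the slices line[i:bracket], line[bracket+1:close], line[bracket:] are take/drop on it.
def parseSpansALoop (rest : List Char) (spans : List (String × Bool)) : List (String × Bool) :=
  if rest = [] then spans                         -- while i < len(line)
  else
    let bracket := PySem.Chars.find rest ['[']    -- line.find("[", i)
    if bracket = -1 then spans ++ [(String.ofList rest, false)]
    else
      let b := bracket.toNat
      let spans1 := if 0 < b then spans ++ [(String.ofList (rest.take b), false)] else spans
      let after := rest.drop (b + 1)
      let close := PySem.Chars.find after [']']   -- line.find("]", bracket + 1)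
      if close = -1 then spans1 ++ [(String.ofList (rest.drop b), false)]
      else
        let c := close.toNat
        parseSpansALoop (after.drop (c + 1)) (spans1 ++ [(String.ofList (after.take c), true)])
termination_by rest.length
decreasing_by
  have hne : rest ≠ [] := by assumption
  have : 0 < rest.length := List.length_pos_iff.mpr hne
  simp only [List.length_drop]; omega

def parse_spans_py (line : String) : List (String × Bool) :=
  let spans := parseSpansALoop line.toList []
  if spans = [] then [("", false)] else spans     -- return spans if spans else [("", False)]

-- ===== PORT B =====
def parseSpansBStep (st : List (String × Bool) × Bool × List Char) (ch : Char) :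
    List (String × Bool) × Bool × List Char :=
  match st with
  | (spans, inb, buf) =>
    if inb then
      if ch = ']' then (spans ++ [(String.ofList buf, true)], false, [])
      else (spans, true, buf ++ [ch])
    else
      if ch = '[' then
        ((if buf ≠ [] then spans ++ [(String.ofList buf, false)] else spans), true, [])
      else (spans, false, buf ++ [ch])

def parseSpansBFin (st : List (String × Bool) × Bool × List Char) : List (String × Bool) :=
  match st with
  | (spans, inb, buf) =>
    if inb then spans ++ [(String.ofList ('[' :: buf), false)]
    else if buf ≠ [] then spans ++ [(String.ofList buf, false)] else spans

def parse_spans_py_alt (line : String) : List (String × Bool) :=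
  let spans := parseSpansBFin (line.toList.foldl parseSpansBStep ([], false, []))
  if spans = [] then [("", false)] else spans

-- ===== PRECONDITION & SPEC =====
def Spec_parse_spans_py (line : String) (out : List (String × Bool)) : Prop := out = parse_spans_py_alt line
instance (line : String) (out : List (String × Bool)) : Decidable (Spec_parse_spans_py line out) := by unfold Spec_parse_spans_py; infer_instance

-- ===== CLAIM (what is proved, stated in full; the proofs are below) =====
def Claim_equal_parse_spans_py : Prop := ∀ (line : String), Dom_parse_spans_py line → Spec_parse_spans_py line (parse_spans_py line)

-- ===== LEMMAS AND PROOFS =====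

lemma singleton_prefix_head (c : Char) (xs : List Char) : [c] <+: xs ↔ xs.head? = some c := by
  cases xs with
  | nil => simp
  | cons a t => simp [List.cons_prefix_iff, eq_comm]

lemma singleton_prefix_drop (c : Char) (l : List Char) (i : Nat) :
    [c] <+: l.drop i ↔ l[i]? = some c := by
  rw [singleton_prefix_head, ← List.head?_drop]

-- characterisation of a successful single-char find
lemma find_char_split (c : Char) (l : List Char) (h0 : 0 ≤ PySem.Chars.find l [c]) :
    (PySem.Chars.find l [c]).toNat < l.length ∧
    l[(PySem.Chars.find l [c]).toNat]? = some c ∧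
    (∀ ch ∈ l.take (PySem.Chars.find l [c]).toNat, ch ≠ c) := by
  obtain ⟨h1, h2⟩ := PySem.Chars.find_spec (s := l) (sub := [c]) h0
  rw [singleton_prefix_drop] at h1
  have hlt : (PySem.Chars.find l [c]).toNat < l.length := by
    by_contra hge
    rw [List.getElem?_eq_none (by omega)] at h1
    simp at h1
  refine ⟨hlt, h1, ?_⟩
  intro ch hch rfl
  obtain ⟨i, hi, hget⟩ := List.mem_iff_getElem.mp hch
  have hib : i < (PySem.Chars.find l [ch]).toNat := by
    rw [List.length_take] at hi; omega
  apply h2 i hib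
  rw [singleton_prefix_drop]
  rw [List.getElem_take] at hget
  rw [List.getElem?_eq_getElem (by omega), hget]

lemma foldl_no_open (t : List Char) (h : ∀ ch ∈ t, ch ≠ '[') :
    ∀ s buf, List.foldl parseSpansBStep (s, false, buf) t = (s, false, buf ++ t) := by
  induction t with
  | nil => simp
  | cons a t ih =>
    intro s buf
    have ha : a ≠ '[' := h a (by simp)
    simp only [List.foldl_cons, parseSpansBStep, if_neg ha, Bool.false_eq_true, if_false]
    rw [ih (fun ch hch => h ch (by simp [hch]))]
    simp

lemma foldl_no_close (t : List Char) (h : ∀ ch ∈ t, ch ≠ ']') :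
    ∀ s buf, List.foldl parseSpansBStep (s, true, buf) t = (s, true, buf ++ t) := by
  induction t with
  | nil => simp
  | cons a t ih =>
    intro s buf
    have ha : a ≠ ']' := h a (by simp)
    simp only [List.foldl_cons, parseSpansBStep, if_neg ha, if_true]
    rw [ih (fun ch hch => h ch (by simp [hch]))]
    simp

lemma core_eq : ∀ n (l : List Char), l.length ≤ n → ∀ s,
    parseSpansBFin (List.foldl parseSpansBStep (s, false, ([] : List Char)) l) =
      parseSpansALoop l s := by
  intro n
  induction n with
  | zero =>
    intro l hl s
    have : l = [] := List.length_eq_zero_iff.mp (Nat.le_zero.mp hl)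
    subst this
    rw [parseSpansALoop]
    simp [parseSpansBFin]
  | succ n ih =>
    intro l hl s
    by_cases hnil : l = []
    · subst hnil; rw [parseSpansALoop]; simp [parseSpansBFin]
    rw [parseSpansALoop, if_neg hnil]
    by_cases hf : PySem.Chars.find l ['['] = -1
    · -- no '[' anywhere
      have hno : ∀ ch ∈ l, ch ≠ '[' := by
        intro ch hch rfl
        have := (PySem.Chars.find_eq_neg_one_iff (s := l) (sub := ['['])).mp hf
        exact this ((List.singleton_infix_iff _ _).mpr hch)
      rw [foldl_no_open l hno s []]
      simp [parseSpansBFin, hnil, hf]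
    · have h0 : 0 ≤ PySem.Chars.find l ['['] := by
        have := PySem.Chars.neg_one_le_find (s := l) (sub := ['['])
        omega
      set b := (PySem.Chars.find l ['[']).toNat with hb
      obtain ⟨hblt, hbget, hbtake⟩ := find_char_split '[' l h0
      have hdropb : l.drop b = '[' :: l.drop (b + 1) := by
        rw [List.drop_eq_getElem_cons hblt]
        have : l[b] = '[' := by
          have := List.getElem?_eq_getElem (l := l) hblt
          rw [hbget] at this; exact (Option.some_injective _ this.symm)
        rw [this]
      have hsplit : l = l.take b ++ '[' :: l.drop (b + 1) := by
        conv_lhs => rw [← List.take_append_drop b l]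
        rw [hdropb]
      -- fold over the prefix and the '['
      conv_lhs => rw [hsplit]
      rw [List.foldl_append, foldl_no_open (l.take b) hbtake s []]
      simp only [List.nil_append, List.foldl_cons]
      have hstep : parseSpansBStep (s, false, l.take b) '[' =
          ((if 0 < b then s ++ [(String.ofList (l.take b), false)] else s), true, []) := by
        simp only [parseSpansBStep, Bool.false_eq_true, if_false, if_true]
        congr 1
        have : l.take b ≠ [] ↔ 0 < b := by
          rw [← List.length_pos_iff, List.length_take]
          omega
        by_cases h01 : 0 < b
        · rw [if_pos (this.mpr h01), if_pos h01]
        · rw [if_neg (fun hne => h01 (this.mp hne)), if_neg h01]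
      rw [hstep]
      set s1 := (if 0 < b then s ++ [(String.ofList (l.take b), false)] else s) with hs1
      set r := l.drop (b + 1) with hr
      simp only [if_neg hf]
      by_cases hg : PySem.Chars.find r [']'] = -1
      · have hno : ∀ ch ∈ r, ch ≠ ']' := by
          intro ch hch rfl
          have := (PySem.Chars.find_eq_neg_one_iff (s := r) (sub := [']'])).mp hg
          exact this ((List.singleton_infix_iff _ _).mpr hch)
        rw [foldl_no_close r hno s1 []]
        simp only [parseSpansBFin, if_true, List.nil_append]
        rw [if_pos hg, hdropb]
      · have hg0 : 0 ≤ PySem.Chars.find r [']'] := by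
          have := PySem.Chars.neg_one_le_find (s := r) (sub := [']'])
          omega
        set c := (PySem.Chars.find r [']']).toNat with hc
        obtain ⟨hclt, hcget, hctake⟩ := find_char_split ']' r hg0
        have hdropc : r.drop c = ']' :: r.drop (c + 1) := by
          rw [List.drop_eq_getElem_cons hclt]
          have : r[c] = ']' := by
            have := List.getElem?_eq_getElem (l := r) hclt
            rw [hcget] at this; exact (Option.some_injective _ this.symm)
          rw [this]
        have hsplitr : r = r.take c ++ ']' :: r.drop (c + 1) := by
          conv_lhs => rw [← List.take_append_drop c r]
          rw [hdropc]
        conv_lhs => rw [hsplitr]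
        rw [List.foldl_append, foldl_no_close (r.take c) hctake s1 []]
        simp only [List.nil_append, List.foldl_cons, parseSpansBStep, if_true]
        rw [if_neg hg]
        have hlen : (r.drop (c + 1)).length ≤ n := by
          have h1 : 0 < l.length := List.length_pos_iff.mpr hnil
          simp only [hr, List.length_drop]
          omega
        exact ih (r.drop (c + 1)) hlen (s1 ++ [(String.ofList (r.take c), true)])

-- ===== VERDICT (by name: the statement is the Claim_ definition above) =====
theorem parse_spans_py_spec : Claim_equal_parse_spans_py := by
  intro line _
  unfold Spec_parse_spans_py parse_spans_py parse_spans_py_alt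
  rw [core_eq line.toList.length line.toList le_rfl []]
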